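-- pv_equiv track=rewrite | github.com/iminlikewithyou/vivirepobotpy | validate_diff.py | validate_diff
-- ===== SOURCE A (Python) =====
-- def validate_diff(diff_text):
--     """
--     Validates and attempts to automatically fix diff file text. Ensures lines start with #, +, or -.
--     Automatically fixes formatting issues and whitespace problems.
--
--     Parameters:
--     - diff_text: A string representing the contents of a diff file.
--
--     Returns:
--     - A tuple (is_valid, result) where is_valid is a boolean indicating if the file could be
--       fixed or if it's valid, and result is either the fixed valid diff text or an error message.
--     """
--
--     fixed_lines = []
--     lines = diff_text.split('\n')
--     previous_line_empty = False
--
--     for line_number, line in enumerate(lines, start=1):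
--         if line.startswith("#"):
--             # Fix formatting for comment lines to ensure only one space after #
--             comment_text = line[1:].lstrip()  # Remove leading spaces after #
--             fixed_line = "#" + " " + comment_text  # Add exactly one space back
--             fixed_lines.append(fixed_line)
--             previous_line_empty = False
--         elif line.startswith(("+", "-")):
--             # Automatically fix the format of added/removed lines
--             content = line[1:].lstrip().upper()  # Remove leading spaces after +/- and convert to uppercase
--             if content:
--                 fixed_line = line[0] + " " + content.rstrip()  # Ensure correct spacing and trim trailing spaces
--                 fixed_lines.append(fixed_line)
--                 previous_line_empty = False
--             else:
--                 return (False, f"Invalid line at {line_number}. No content after {line[0]}.")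
--         elif line.strip() == "":
--             if not previous_line_empty:
--                 # Convert lines that contain only whitespace to empty lines
--                 fixed_lines.append("")
--                 previous_line_empty = True
--         else:
--             return (False, f"Invalid line at {line_number}. Must start with +, -, or #.")
--
--     # Trim leading and trailing newlines
--     while fixed_lines and fixed_lines[0] == "":
--         fixed_lines.pop(0)
--     while fixed_lines and fixed_lines[-1] == "":
--         fixed_lines.pop()
--
--     # Join the fixed lines back into a single string
--     fixed_text = '\n'.join(fixed_lines)
--     return (True, fixed_text)
-- ===== SOURCE B (Python) =====
-- def validate_diff(diff_text):
--     lines = diff_text.split('\n')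
--     # Pass 1: find the first invalid line, left to right.
--     for i, line in enumerate(lines, start=1):
--         if line.startswith('#'):
--             continue
--         if line.startswith(('+', '-')):
--             if line[1:].strip():
--                 continue
--             return (False, f"Invalid line at {i}. No content after {line[0]}.")
--         if line.strip():
--             return (False, f"Invalid line at {i}. Must start with +, -, or #.")
--     # Pass 2: transform each line, dropping leading blanks and collapsing blank runs.
--     fixed = []
--     for line in lines:
--         if line.startswith('#'):
--             fixed.append('# ' + line[1:].lstrip())
--         elif line.startswith(('+', '-')):
--             fixed.append(line[0] + ' ' + line[1:].lstrip().upper().rstrip())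
--         elif fixed and fixed[-1]:
--             fixed.append('')
--     # Pass 3: drop trailing blanks.
--     while fixed and not fixed[-1]:
--         fixed.pop()
--     return (True, '\n'.join(fixed))
-- ===== Notes on version B (the rewrite author's own statement) =====
-- stated objective: alternative
-- what changed: A interleaves validation, line fixing and blank-collapsing in one loop with a previous_line_empty flag, then strips leading/trailing blanks with two pop loops; B separates the work into an error-scan pass (first invalid line, left to right), a build pass that drops leading blanks and collapses blank runs by looking at the last emitted line, and a final trailing-blank trim.
import Mathlib
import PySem

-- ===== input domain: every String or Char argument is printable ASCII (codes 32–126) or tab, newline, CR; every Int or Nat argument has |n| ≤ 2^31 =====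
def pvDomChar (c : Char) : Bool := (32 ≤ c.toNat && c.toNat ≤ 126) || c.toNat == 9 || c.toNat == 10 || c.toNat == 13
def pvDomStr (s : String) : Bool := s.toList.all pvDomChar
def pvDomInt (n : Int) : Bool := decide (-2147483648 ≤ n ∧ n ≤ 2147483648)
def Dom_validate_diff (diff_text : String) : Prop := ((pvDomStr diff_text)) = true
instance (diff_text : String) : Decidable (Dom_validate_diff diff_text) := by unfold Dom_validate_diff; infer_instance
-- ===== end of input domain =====

-- B separates A's single validating/fixing/collapsing loop into an error-scan pass, a build
-- pass collapsing blanks via the last emitted line, and a trailing trim (alternative decomposition).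


-- ===== PORT A =====
-- A's loop: early return (Sum.inl) of the error tuple, or (Sum.inr) the accumulated fixed_lines.
def aLoop (lines : List String) (n : Int) (acc : List String) (prev : Bool) :
    (Bool × String) ⊕ List String :=
  match lines with
  | [] => Sum.inr acc
  | line :: rest =>
    if PySem.Str.startswith line "#" then
      aLoop rest (n + 1)
        (acc ++ ["#" ++ " " ++ PySem.Str.lstrip (PySem.Str.slice line (some 1) none)]) false
    else if PySem.Str.startswith line "+" || PySem.Str.startswith line "-" then
      let content := PySem.Str.upper (PySem.Str.lstrip (PySem.Str.slice line (some 1) none))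
      if content ≠ "" then
        -- line[0] exists here (line starts with '+' or '-'); .getD ' ' is never used
        aLoop rest (n + 1)
          (acc ++ [String.ofList [(PySem.Str.pyGet? line 0).getD ' '] ++ " " ++ PySem.Str.rstrip content])
          false
      else
        Sum.inl (false, "Invalid line at " ++ PySem.Int.toStr n ++ ". No content after "
          ++ String.ofList [(PySem.Str.pyGet? line 0).getD ' '] ++ ".")
    else if PySem.Str.strip line = "" then
      if !prev then aLoop rest (n + 1) (acc ++ [""]) true
      else aLoop rest (n + 1) acc true
    else
      Sum.inl (false, "Invalid line at " ++ PySem.Int.toStr n ++ ". Must start with +, -, or #.")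

def validate_diff (diff_text : String) : Bool × String :=
  let lines := (PySem.Str.split? diff_text "\n").getD []   -- '\n' ≠ "", split? is some
  match aLoop lines 1 [] false with
  | Sum.inl e => e
  | Sum.inr fixed =>
    -- the two while-pop loops: drop leading then trailing "" elements
    let fixed := fixed.dropWhile (fun l => l == "")
    let fixed := (fixed.reverse.dropWhile (fun l => l == "")).reverse
    (true, PySem.Str.join "\n" fixed)

-- ===== PORT B =====
-- B pass 1: first invalid line, or none.
def bScan (lines : List String) (n : Int) : Option (Bool × String) :=
  match lines with
  | [] => none
  | line :: rest =>
    if PySem.Str.startswith line "#" then bScan rest (n + 1)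
    else if PySem.Str.startswith line "+" || PySem.Str.startswith line "-" then
      if PySem.Str.strip (PySem.Str.slice line (some 1) none) ≠ "" then bScan rest (n + 1)
      else
        some (false, "Invalid line at " ++ PySem.Int.toStr n ++ ". No content after "
          ++ String.ofList [(PySem.Str.pyGet? line 0).getD ' '] ++ ".")
    else if PySem.Str.strip line ≠ "" then
      some (false, "Invalid line at " ++ PySem.Int.toStr n ++ ". Must start with +, -, or #.")
    else bScan rest (n + 1)

-- B pass 2: transform, dropping leading blanks and collapsing blank runs via the last emitted line.
def bBuild (lines : List String) (acc : List String) : List String :=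
  match lines with
  | [] => acc
  | line :: rest =>
    if PySem.Str.startswith line "#" then
      bBuild rest (acc ++ ["# " ++ PySem.Str.lstrip (PySem.Str.slice line (some 1) none)])
    else if PySem.Str.startswith line "+" || PySem.Str.startswith line "-" then
      bBuild rest (acc ++ [String.ofList [(PySem.Str.pyGet? line 0).getD ' '] ++ " "
        ++ PySem.Str.rstrip (PySem.Str.upper (PySem.Str.lstrip (PySem.Str.slice line (some 1) none)))])
    else if acc.getLast?.getD "" ≠ "" then bBuild rest (acc ++ [""])
    else bBuild rest acc

def validate_diff_alt (diff_text : String) : Bool × String :=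
  let lines := (PySem.Str.split? diff_text "\n").getD []
  match bScan lines 1 with
  | some e => e
  | none =>
    let fixed := bBuild lines []
    -- pass 3: drop trailing blanks
    let fixed := (fixed.reverse.dropWhile (fun l => l == "")).reverse
    (true, PySem.Str.join "\n" fixed)

-- ===== PRECONDITION & SPEC =====
def Spec_validate_diff (diff_text : String) (out : Bool × String) : Prop := out = validate_diff_alt diff_text
instance (diff_text : String) (out : Bool × String) : Decidable (Spec_validate_diff diff_text out) := by unfold Spec_validate_diff; infer_instance

-- ===== CLAIM (what is proved, stated in full; the proofs are below) =====
def Claim_equal_validate_diff : Prop := ∀ (diff_text : String), Dom_validate_diff diff_text → Spec_validate_diff diff_text (validate_diff diff_text)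

-- ===== LEMMAS AND PROOFS =====

-- the per-line fixed strings, named for the proofs
def cfix (line : String) : String := "#" ++ " " ++ PySem.Str.lstrip (PySem.Str.slice line (some 1) none)
def sfix (line : String) : String :=
  String.ofList [(PySem.Str.pyGet? line 0).getD ' '] ++ " "
    ++ PySem.Str.rstrip (PySem.Str.upper (PySem.Str.lstrip (PySem.Str.slice line (some 1) none)))

-- A's collapse, as a pure function of the lines and the previous_line_empty flag (junk [] on invalid lines)
def collA (lines : List String) (prev : Bool) : List String :=
  match lines with
  | [] => []
  | line :: rest =>
    if PySem.Str.startswith line "#" then cfix line :: collA rest false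
    else if PySem.Str.startswith line "+" || PySem.Str.startswith line "-" then
      if PySem.Str.upper (PySem.Str.lstrip (PySem.Str.slice line (some 1) none)) ≠ "" then
        sfix line :: collA rest false
      else []
    else if PySem.Str.strip line = "" then
      if !prev then "" :: collA rest true else collA rest true
    else []

-- B's collapse, as a function of the lines and "last emitted line is nonempty" (s)
def collB (lines : List String) (s : Bool) : List String :=
  match lines with
  | [] => []
  | line :: rest =>
    if PySem.Str.startswith line "#" then ("# " ++ PySem.Str.lstrip (PySem.Str.slice line (some 1) none)) :: collB rest true
    else if PySem.Str.startswith line "+" || PySem.Str.startswith line "-" then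
      sfix line :: collB rest true
    else if s then "" :: collB rest false else collB rest s

-- a string is "" iff its char list is []
theorem str_eq_empty_iff (s : String) : s = "" ↔ s.toList = [] := by
  constructor
  · rintro rfl; rfl
  · intro h; apply String.ext; simpa using h

theorem dropWhile_allP {α : Type} (p : α → Bool) (l : List α) :
    (∀ x ∈ List.dropWhile p l, p x = true) ↔ (∀ x ∈ l, p x = true) := by
  induction l with
  | nil => simp
  | cons a t ih =>
    rw [List.dropWhile_cons]
    by_cases h : p a = true
    · simp [h, ih]
    · simp [h]

theorem emptiness (t : String) :
    (PySem.Str.upper (PySem.Str.lstrip t) = "") ↔ (PySem.Str.strip t = "") := by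
  rw [str_eq_empty_iff, str_eq_empty_iff, PySem.Str.toList_upper, PySem.Str.toList_lstrip,
    PySem.Str.toList_strip]
  unfold PySem.Chars.upper PySem.Chars.strip PySem.Chars.rstrip PySem.Chars.lstrip
  simp only [List.map_eq_nil_iff, List.reverse_eq_nil_iff, List.dropWhile_eq_nil_iff,
    List.mem_reverse]
  exact (dropWhile_allP PySem.Chars.isspace t.toList).symm

-- the fixed lines are never empty strings
theorem cfix_ne (line : String) : cfix line ≠ "" := by
  intro h
  rw [str_eq_empty_iff] at h
  simp [cfix] at h

theorem cfixB_eq (line : String) :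
    "# " ++ PySem.Str.lstrip (PySem.Str.slice line (some 1) none) = cfix line := by
  apply String.ext; simp [cfix]

theorem sfix_ne (line : String) : sfix line ≠ "" := by
  intro h
  rw [str_eq_empty_iff] at h
  simp [sfix] at h

-- valid lines (the ones on which neither program errors)
def okLine (line : String) : Bool :=
  if PySem.Str.startswith line "#" then true
  else if PySem.Str.startswith line "+" || PySem.Str.startswith line "-" then
    decide (PySem.Str.strip (PySem.Str.slice line (some 1) none) ≠ "")
  else decide (PySem.Str.strip line = "")

theorem bScan_none_ok (lines : List String) (n : Int) (h : bScan lines n = none) :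
    ∀ l ∈ lines, okLine l = true := by
  induction lines generalizing n with
  | nil => simp
  | cons line rest ih =>
    intro l hl
    unfold bScan at h
    rcases List.mem_cons.mp hl with rfl | hl
    · unfold okLine
      by_cases h1 : PySem.Str.startswith l "#" = true
      · rw [if_pos h1]
      · rw [if_neg h1]; rw [if_neg h1] at h
        by_cases h2 : (PySem.Str.startswith l "+" || PySem.Str.startswith l "-") = true
        · rw [if_pos h2]; rw [if_pos h2] at h
          by_cases h3 : PySem.Str.strip (PySem.Str.slice l (some 1) none) ≠ ""
          · simp [h3]
          · rw [if_neg h3] at h; exact absurd h (by simp)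
        · rw [if_neg h2]; rw [if_neg h2] at h
          by_cases h3 : PySem.Str.strip l ≠ ""
          · rw [if_pos h3] at h; exact absurd h (by simp)
          · simp only [ne_eq, not_not] at h3; simp [h3]
    · by_cases h1 : PySem.Str.startswith line "#" = true
      · rw [if_pos h1] at h; exact ih _ h _ hl
      · rw [if_neg h1] at h
        by_cases h2 : (PySem.Str.startswith line "+" || PySem.Str.startswith line "-") = true
        · rw [if_pos h2] at h
          by_cases h3 : PySem.Str.strip (PySem.Str.slice line (some 1) none) ≠ ""
          · rw [if_pos h3] at h; exact ih _ h _ hl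
          · rw [if_neg h3] at h; exact absurd h (by simp)
        · rw [if_neg h2] at h
          by_cases h3 : PySem.Str.strip line ≠ ""
          · rw [if_pos h3] at h; exact absurd h (by simp)
          · rw [if_neg h3] at h; exact ih _ h _ hl

theorem aLoop_eq (lines : List String) (n : Int) (acc : List String) (prev : Bool) :
    aLoop lines n acc prev =
      match bScan lines n with
      | some e => Sum.inl e
      | none => Sum.inr (acc ++ collA lines prev) := by
  induction lines generalizing n acc prev with
  | nil => simp [aLoop, bScan, collA]
  | cons line rest ih =>
    unfold aLoop bScan collA
    by_cases h1 : PySem.Str.startswith line "#" = true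
    · simp only [h1, if_true]
      rw [ih]
      cases bScan rest (n + 1) <;> simp [cfix]
    · simp only [h1, Bool.false_eq_true, if_false]
      by_cases h2 : (PySem.Str.startswith line "+" || PySem.Str.startswith line "-") = true
      · simp only [h2, if_true]
        by_cases h3 : PySem.Str.strip (PySem.Str.slice line (some 1) none) = ""
        · have h4 : PySem.Str.upper (PySem.Str.lstrip (PySem.Str.slice line (some 1) none)) = "" :=
            (emptiness _).mpr h3
          simp [h3, h4]
        · have h4 : PySem.Str.upper (PySem.Str.lstrip (PySem.Str.slice line (some 1) none)) ≠ "" :=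
            fun hc => h3 ((emptiness _).mp hc)
          simp only [h3, h4, ne_eq, not_false_eq_true, if_pos]
          rw [ih]
          cases bScan rest (n + 1) <;> simp [sfix]
      · simp only [h2, Bool.false_eq_true, if_false]
        by_cases h3 : PySem.Str.strip line = ""
        · simp only [h3, ne_eq, not_true_eq_false, if_false, if_true]
          cases prev
          · simp only [Bool.not_false, if_true]
            rw [ih]
            cases bScan rest (n + 1) <;> simp
          · simp only [Bool.not_true, Bool.false_eq_true, if_false]
            rw [ih]
        · simp [h3]

theorem bBuild_eq (lines : List String) (acc : List String) :
    bBuild lines acc = acc ++ collB lines (acc.getLast?.getD "" != "") := by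
  induction lines generalizing acc with
  | nil => simp [bBuild, collB]
  | cons line rest ih =>
    unfold bBuild collB
    by_cases h1 : PySem.Str.startswith line "#" = true
    · simp only [h1, if_true]
      rw [ih]
      have : (("# " ++ PySem.Str.lstrip (PySem.Str.slice line (some 1) none)) != "") = true := by
        simp [bne_iff_ne, cfixB_eq line, cfix_ne line]
      simp [this]
    · simp only [h1, Bool.false_eq_true, if_false]
      by_cases h2 : (PySem.Str.startswith line "+" || PySem.Str.startswith line "-") = true
      · simp only [h2, if_true]
        rw [ih]
        have hne : (sfix line != "") = true := by simp [bne_iff_ne, sfix_ne line]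
        simp only [sfix] at hne
        simp only [List.getLast?_concat, Option.getD_some, hne, List.append_assoc,
          List.singleton_append, sfix]
      · simp only [h2, Bool.false_eq_true, if_false]
        by_cases h3 : acc.getLast?.getD "" ≠ ""
        · have hb : (acc.getLast?.getD "" != "") = true := by simp [bne_iff_ne, h3]
          rw [if_pos h3, hb, if_pos rfl, ih]
          simp
        · have hb : (acc.getLast?.getD "" != "") = false := by
            simp only [ne_eq, not_not] at h3; simp [h3]
          rw [if_neg h3, hb, ih, hb]
          simp

theorem collA_collB (lines : List String) (hok : ∀ l ∈ lines, okLine l = true) :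
    collA lines false = collB lines true ∧ collA lines true = collB lines false := by
  induction lines with
  | nil => simp [collA, collB]
  | cons line rest ih =>
    have hline := hok line (List.mem_cons_self ..)
    have hrest := ih fun l hl => hok l (List.mem_cons_of_mem _ hl)
    unfold collA collB
    unfold okLine at hline
    by_cases h1 : PySem.Str.startswith line "#" = true
    · constructor <;> simp only [if_pos h1, cfixB_eq, hrest.1]
    · by_cases h2 : (PySem.Str.startswith line "+" || PySem.Str.startswith line "-") = true
      · rw [if_neg h1, if_pos h2] at hline
        have h3 : PySem.Str.strip (PySem.Str.slice line (some 1) none) ≠ "" :=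
          of_decide_eq_true hline
        have h4 : PySem.Str.upper (PySem.Str.lstrip (PySem.Str.slice line (some 1) none)) ≠ "" :=
          fun hc => h3 ((emptiness _).mp hc)
        constructor <;> simp only [if_neg h1, if_pos h2, if_pos h4, hrest.1]
      · rw [if_neg h1, if_neg h2] at hline
        have h3 : PySem.Str.strip line = "" := of_decide_eq_true hline
        constructor <;>
          simp only [if_neg h1, if_neg h2, if_pos h3, Bool.not_false, Bool.not_true, if_true,
            Bool.false_eq_true, if_false, hrest.2]

theorem collA_true_head (lines : List String) :
    ∀ h ∈ (collA lines true).head?, h ≠ "" := by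
  induction lines with
  | nil => simp [collA]
  | cons line rest ih =>
    unfold collA
    by_cases h1 : PySem.Str.startswith line "#" = true
    · simp only [if_pos h1, List.head?_cons, Option.mem_some_iff]
      rintro h rfl; exact cfix_ne line
    · by_cases h2 : (PySem.Str.startswith line "+" || PySem.Str.startswith line "-") = true
      · by_cases h3 : PySem.Str.upper (PySem.Str.lstrip (PySem.Str.slice line (some 1) none)) ≠ ""
        · simp only [if_neg h1, if_pos h2, if_pos h3, List.head?_cons, Option.mem_some_iff]
          rintro h rfl; exact sfix_ne line
        · simp only [if_neg h1, if_pos h2, if_neg h3]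
          simp
      · by_cases h3 : PySem.Str.strip line = ""
        · simpa only [if_neg h1, if_neg h2, if_pos h3, Bool.not_true, Bool.false_eq_true,
            if_false] using ih
        · simp only [if_neg h1, if_neg h2, if_neg h3]
          simp

theorem dropWhile_head_ne {l : List String} (h : ∀ x ∈ l.head?, x ≠ "") :
    List.dropWhile (fun s => s == "") l = l := by
  cases l with
  | nil => rfl
  | cons a t =>
    have : a ≠ "" := h a rfl
    simp [this]

theorem dropWhile_collA (lines : List String) :
    (collA lines false).dropWhile (fun l => l == "") = collA lines true := by
  induction lines with
  | nil => simp [collA]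
  | cons line rest ih =>
    unfold collA
    by_cases h1 : PySem.Str.startswith line "#" = true
    · have hc : (cfix line == "") = false := by simp [cfix_ne line]
      simp only [if_pos h1, List.dropWhile_cons, hc, Bool.false_eq_true, if_false]
    · by_cases h2 : (PySem.Str.startswith line "+" || PySem.Str.startswith line "-") = true
      · by_cases h3 : PySem.Str.upper (PySem.Str.lstrip (PySem.Str.slice line (some 1) none)) ≠ ""
        · have hs : (sfix line == "") = false := by simp [sfix_ne line]
          simp only [if_neg h1, if_pos h2, if_pos h3, List.dropWhile_cons, hs,
            Bool.false_eq_true, if_false]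
        · simp only [if_neg h1, if_pos h2, if_neg h3]
          simp
      · by_cases h3 : PySem.Str.strip line = ""
        · simp only [if_neg h1, if_neg h2, if_pos h3, Bool.not_false, if_true, Bool.not_true,
            Bool.false_eq_true, if_false]
          exact dropWhile_head_ne (collA_true_head rest)
        · simp only [if_neg h1, if_neg h2, if_neg h3]
          simp

-- ===== VERDICT (by name: the statement is the Claim_ definition above) =====
theorem validate_diff_spec : Claim_equal_validate_diff := by
  intro diff_text _
  unfold Spec_validate_diff validate_diff validate_diff_alt
  dsimp only
  rw [aLoop_eq, bBuild_eq]
  cases h : bScan ((PySem.Str.split? diff_text "\n").getD []) 1 with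
  | some e => rfl
  | none =>
    have hok := bScan_none_ok _ _ h
    have hAB := collA_collB _ hok
    dsimp only
    simp only [List.nil_append, List.getLast?_nil, Option.getD_none, bne_self_eq_false]
    rw [dropWhile_collA, hAB.2]
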